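-- pv_equiv track=rewrite | github.com/Kikuzawa/DSTU_VKB | Methods_Programming/laboratories/2/2.py | can_form_branches
-- ===== SOURCE A (Python) =====
-- from typing import List, Iterable
--
-- def can_form_branches(
--         max_uncomfortable: int,
--         discomforts: Iterable[int],
--         r: int,
--         c: int
-- ) -> bool:
--     count = 0
--     members_in_current_branch = 0
--     for discomfort in discomforts:
--         members_in_current_branch -= 1
--         if members_in_current_branch < 1 and discomfort <= max_uncomfortable:
--             count += 1
--             members_in_current_branch = c
--
--     return count >= r
-- ===== SOURCE B (Python) =====
-- def can_form_branches(max_uncomfortable, discomforts, r, c):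
--     # Dynamic programming over suffixes, filled right-to-left:
--     # g[i] = number of branches formable from discomforts[i:].
--     ds = list(discomforts)
--     n = len(ds)
--     step = max(c, 1)
--     g = [0] * (n + 1)
--     for i in range(n - 1, -1, -1):
--         if ds[i] <= max_uncomfortable:
--             g[i] = 1 + g[min(i + step, n)]
--         else:
--             g[i] = g[i + 1]
--     return g[0] >= r
-- ===== Notes on version B (the rewrite author's own statement) =====
-- stated objective: alternative
-- what changed: Replaces A's forward greedy scan carrying a branch-membership countdown with a dynamic-programming table over suffixes filled right-to-left (g[i] = branches formable from ds[i:], g[i] = 1+g[i+max(c,1)] on a hit, else g[i+1]), answering g[0] >= r.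
import Mathlib
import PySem

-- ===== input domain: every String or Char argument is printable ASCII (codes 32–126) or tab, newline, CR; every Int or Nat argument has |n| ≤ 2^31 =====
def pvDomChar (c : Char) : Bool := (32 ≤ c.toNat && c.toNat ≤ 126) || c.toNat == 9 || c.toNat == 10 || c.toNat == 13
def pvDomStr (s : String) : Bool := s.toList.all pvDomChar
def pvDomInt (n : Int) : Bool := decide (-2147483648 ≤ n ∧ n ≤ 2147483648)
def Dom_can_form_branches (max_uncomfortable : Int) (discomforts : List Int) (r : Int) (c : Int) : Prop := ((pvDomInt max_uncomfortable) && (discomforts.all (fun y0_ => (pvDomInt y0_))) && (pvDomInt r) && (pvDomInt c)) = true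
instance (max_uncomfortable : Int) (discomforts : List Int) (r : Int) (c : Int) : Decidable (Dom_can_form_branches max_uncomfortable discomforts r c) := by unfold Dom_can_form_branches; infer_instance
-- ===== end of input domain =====

-- B replaces A's forward greedy scan with a consumption countdown by a dynamic-programming
-- table over suffixes, filled right-to-left (alternative decomposition, same cost).
-- ===== PORT A =====
-- A's for-loop over (count, members_in_current_branch), transcribed as structural recursion.
def canA_loop (M c : Int) : List Int → Int × Int → Int × Int
  | [], st => st
  | d :: t, st =>
      let m := st.2 - 1
      canA_loop M c t (if m < 1 ∧ d ≤ M then (st.1 + 1, c) else (st.1, m))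

def can_form_branches (max_uncomfortable : Int) (discomforts : List Int) (r : Int) (c : Int) : Bool :=
  decide (r ≤ (canA_loop max_uncomfortable c discomforts (0, 0)).1)

-- ===== PORT B =====
-- B's right-to-left DP fill of g (g[i] = branches formable from ds[i:], g[n] = 0) is
-- transcribed as a structural recursion producing the table of all suffix values:
-- entry j of the table for t is g at the suffix t.drop j; the cons builds the table
-- one cell leftwards, exactly the loop body (hit: 1 + g[min(i+step, n)], miss: g[i+1]).
def canB_table (M : Int) (step : Nat) : List Int → List Int
  | [] => [0]
  | d :: t =>
      let gt := canB_table M step t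
      (if d ≤ M then 1 + gt.getD (min (step - 1) t.length) 0 else gt.headD 0) :: gt

def can_form_branches_alt (max_uncomfortable : Int) (discomforts : List Int) (r : Int) (c : Int) : Bool :=
  decide (r ≤ (canB_table max_uncomfortable (max c 1).toNat discomforts).headD 0)

-- ===== PRECONDITION & SPEC =====
def Spec_can_form_branches (max_uncomfortable : Int) (discomforts : List Int) (r : Int) (c : Int) (out : Bool) : Prop := out = can_form_branches_alt max_uncomfortable discomforts r c
instance (max_uncomfortable : Int) (discomforts : List Int) (r : Int) (c : Int) (out : Bool) : Decidable (Spec_can_form_branches max_uncomfortable discomforts r c out) := by unfold Spec_can_form_branches; infer_instance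

-- ===== CLAIM (what is proved, stated in full; the proofs are below) =====
def Claim_equal_can_form_branches : Prop := ∀ (max_uncomfortable : Int) (discomforts : List Int) (r : Int) (c : Int), Dom_can_form_branches max_uncomfortable discomforts r c → Spec_can_form_branches max_uncomfortable discomforts r c (can_form_branches max_uncomfortable discomforts r c)

-- ===== LEMMAS AND PROOFS =====

-- Entry j of the table is the head entry of the table for the suffix t.drop j.
lemma canB_table_getD (M : Int) (step : Nat) : ∀ (t : List Int) (j : Nat),
    (canB_table M step t).getD j 0 = (canB_table M step (t.drop j)).headD 0 := by
  intro t
  induction t with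
  | nil =>
      intro j; cases j <;> simp [canB_table]
  | cons d t ih =>
      intro j
      cases j with
      | zero => simp [canB_table, List.getD, List.headD]
      | succ j =>
          simp only [canB_table, List.drop_succ_cons]
          have : ((if d ≤ M then 1 + (canB_table M step t).getD (min (step - 1) t.length) 0
                   else (canB_table M step t).headD 0) :: canB_table M step t).getD (j + 1) 0
                 = (canB_table M step t).getD j 0 := by simp [List.getD]
          rw [this, ih]

-- The head of B's table satisfies the skip recurrence.
lemma canB_head_cons (M : Int) (step : Nat) (d : Int) (t : List Int) :
    (canB_table M step (d :: t)).headD 0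
      = if d ≤ M then 1 + (canB_table M step (t.drop (step - 1))).headD 0
        else (canB_table M step t).headD 0 := by
  have hdrop : t.drop (min (step - 1) t.length) = t.drop (step - 1) := by
    rcases le_or_gt (step - 1) t.length with h | h
    · rw [min_eq_left h]
    · rw [min_eq_right (le_of_lt h), List.drop_length,
          List.drop_eq_nil_of_le (le_of_lt h)]
  simp only [canB_table, List.headD_cons]
  rw [canB_table_getD, hdrop]

-- While members_in_current_branch stays ≥ 1, A only decrements it: state k+1 skips k elements.
lemma canA_skip (M c : Int) : ∀ (k : Nat) (t : List Int) (cnt : Int),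
    (canA_loop M c t (cnt, (k : Int) + 1)).1 = (canA_loop M c (t.drop k) (cnt, 1)).1 := by
  intro k
  induction k with
  | zero => intro t cnt; simp
  | succ k ih =>
      intro t cnt
      cases t with
      | nil => simp [canA_loop]
      | cons d t =>
          have h : ¬ ((((k + 1 : Nat) : Int) + 1 - 1 < 1) ∧ d ≤ M) := by
            intro h'; omega
          simp only [canA_loop, if_neg h, List.drop_succ_cons]
          have h2 : (((k + 1 : Nat) : Int) + 1 - 1) = (k : Int) + 1 := by push_cast; ring
          rw [h2, ih]

lemma canA_skip' (M c m : Int) (hm : 1 ≤ m) (t : List Int) (cnt : Int) :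
    (canA_loop M c t (cnt, m)).1 = (canA_loop M c (t.drop (m - 1).toNat) (cnt, 1)).1 := by
  have h : (((m - 1).toNat : Nat) : Int) + 1 = m := by omega
  have h2 := canA_skip M c (m - 1).toNat t cnt
  rw [h] at h2; exact h2

-- Main invariant: from any state with members ≤ 1, A's remaining count equals B's suffix value.
lemma canA_eq_canB (M c : Int) : ∀ (n : Nat) (t : List Int), t.length ≤ n →
    ∀ (cnt m : Int), m ≤ 1 →
    (canA_loop M c t (cnt, m)).1 = cnt + (canB_table M (max c 1).toNat t).headD 0 := by
  intro n
  induction n with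
  | zero =>
      intro t ht cnt m _
      have h : t = [] := by cases t <;> simp_all
      subst h; simp [canA_loop, canB_table]
  | succ n ih =>
      intro t ht cnt m hm
      cases t with
      | nil => simp [canA_loop, canB_table]
      | cons d t =>
          have hlen : t.length ≤ n := by simp at ht; omega
          rw [canB_head_cons]
          by_cases hd : d ≤ M
          · have hcnd : (m - 1 < 1) ∧ d ≤ M := ⟨by omega, hd⟩
            simp only [canA_loop, if_pos hcnd, if_pos hd]
            have hstep : (max c 1).toNat - 1 = (c - 1).toNat := by omega
            by_cases hc : 1 ≤ c
            · rw [canA_skip' M c c hc t (cnt + 1),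
                  ih _ (le_trans (by simp) hlen) _ _ (le_refl 1), hstep]
              ring
            · have h0 : (c - 1).toNat = 0 := by omega
              rw [hstep, h0, List.drop_zero, ih _ hlen _ _ (by omega)]
              ring
          · have hcnd : ¬ ((m - 1 < 1) ∧ d ≤ M) := by intro h'; exact hd h'.2
            simp only [canA_loop, if_neg hcnd, if_neg hd]
            exact ih _ hlen _ _ (by omega)

-- ===== VERDICT (by name: the statement is the Claim_ definition above) =====
theorem can_form_branches_spec : Claim_equal_can_form_branches := by
  intro M ds r c _
  unfold Spec_can_form_branches can_form_branches can_form_branches_alt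
  rw [canA_eq_canB M c ds.length ds (le_refl _) 0 0 (by omega)]
  simp
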